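-- pv_equiv track=rewrite | github.com/ashinzekene/bioinformatics | genome-sequencing/week_3/linear_subpeptide_count.py | LinearSubPeptideCount
-- ===== SOURCE A (Python) =====
-- def LinearSubPeptideCount(x):
--     result = 0
--     for i in range(1, x+1):
--         if i <= 2:
--             result+= 2
--         else:
--             result+=i
--     return result
-- ===== SOURCE B (Python) =====
-- def LinearSubPeptideCount(x):
--     # Closed form: for x >= 2 the loop sums 2+2+3+4+...+x = x*(x+1)//2 + 1.
--     if x <= 0:
--         return 0
--     if x == 1:
--         return 2
--     return x * (x + 1) // 2 + 1
-- ===== Notes on version B (the rewrite author's own statement) =====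
-- stated objective: faster
-- what changed: Replaces the O(x) accumulation loop by a closed-form arithmetic formula (triangular number plus a constant) with small-case handling.
import Mathlib
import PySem

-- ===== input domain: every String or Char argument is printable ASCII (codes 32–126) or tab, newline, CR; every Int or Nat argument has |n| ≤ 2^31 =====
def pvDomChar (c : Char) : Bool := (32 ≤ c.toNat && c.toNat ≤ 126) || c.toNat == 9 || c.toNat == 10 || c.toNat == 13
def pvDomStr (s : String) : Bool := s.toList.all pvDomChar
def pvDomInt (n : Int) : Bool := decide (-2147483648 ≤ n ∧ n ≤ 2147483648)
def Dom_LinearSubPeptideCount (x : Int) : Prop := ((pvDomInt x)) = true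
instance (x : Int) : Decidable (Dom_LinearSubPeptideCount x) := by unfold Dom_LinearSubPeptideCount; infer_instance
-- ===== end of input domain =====

-- ===== PORT A =====
-- Header: B computes the same value by the closed form x*(x+1)//2 + 1; objective: faster (O(1) vs O(x)).
def LinearSubPeptideCount (x : Int) : Int :=
  (PySem.List.pyRange 1 (x + 1) 1).foldl
    (fun result i => if i ≤ 2 then result + 2 else result + i) 0

-- ===== PORT B =====
def LinearSubPeptideCount_alt (x : Int) : Int :=
  if x ≤ 0 then 0
  else if x = 1 then 2
  else PySem.Int.floordiv (x * (x + 1)) 2 + 1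

-- ===== PRECONDITION & SPEC =====
def Spec_LinearSubPeptideCount (x : Int) (out : Int) : Prop := out = LinearSubPeptideCount_alt x
instance (x : Int) (out : Int) : Decidable (Spec_LinearSubPeptideCount x out) := by unfold Spec_LinearSubPeptideCount; infer_instance

-- ===== CLAIM (what is proved, stated in full; the proofs are below) =====
def Claim_equal_LinearSubPeptideCount : Prop := ∀ (x : Int), Dom_LinearSubPeptideCount x → Spec_LinearSubPeptideCount x (LinearSubPeptideCount x)

-- ===== LEMMAS AND PROOFS =====

-- Twice the loop's value, for x ≥ 2, is x*(x+1) + 2 (stated on Nat to induct).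
theorem pv_loop_twice (n : Nat) (h : 2 ≤ n) :
    2 * LinearSubPeptideCount (n : Int) = (n : Int) * ((n : Int) + 1) + 2 := by
  induction n with
  | zero => omega
  | succ m ih =>
    rcases Nat.lt_or_ge m 2 with hm | hm
    · interval_cases m
      · omega
      · show 2 * LinearSubPeptideCount ((2 : Nat) : Int) = ((2:Nat) : Int) * (((2:Nat) : Int) + 1) + 2
        norm_num
        decide
    · have step : LinearSubPeptideCount ((m + 1 : Nat) : Int)
          = LinearSubPeptideCount (m : Int) + ((m : Int) + 1) := by
        unfold LinearSubPeptideCount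
        rw [show ((m + 1 : Nat) : Int) + 1 = ((m : Int) + 1) + 1 by push_cast; ring,
            PySem.List.pyRange_one_succ_right (by omega),
            List.foldl_append]
        simp only [List.foldl_cons, List.foldl_nil]
        rw [if_neg (by omega)]
      have ih' := ih hm
      rw [step]
      push_cast
      push_cast at ih'
      nlinarith [ih']

theorem pv_A_eq_alt (x : Int) : LinearSubPeptideCount x = LinearSubPeptideCount_alt x := by
  unfold LinearSubPeptideCount_alt
  split_ifs with h0 h1
  · unfold LinearSubPeptideCount
    rw [PySem.List.pyRange_one_eq_nil (by omega)]
    rfl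
  · subst h1
    unfold LinearSubPeptideCount
    rw [PySem.List.pyRange_one_cons (by norm_num), PySem.List.pyRange_one_eq_nil (by norm_num)]
    norm_num
  · have hx : 2 ≤ x := by omega
    obtain ⟨n, hn⟩ : ∃ n : Nat, x = (n : Int) := ⟨x.toNat, by omega⟩
    subst hn
    have hn2 : 2 ≤ n := by exact_mod_cast hx
    have h2 := pv_loop_twice n hn2
    rw [PySem.Int.floordiv_eq_ediv_of_pos (by norm_num)]
    omega

-- ===== VERDICT (by name: the statement is the Claim_ definition above) =====
theorem LinearSubPeptideCount_spec : Claim_equal_LinearSubPeptideCount := by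
  intro x _
  exact pv_A_eq_alt x
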